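-- pv_equiv track=rewrite | github.com/macleginn/grammar-correction | code/compare_trees.py | linearise_tree
-- ===== SOURCE A (Python) =====
-- from queue import Queue
--
-- def linearise_tree(conll_tree, root_index):
--     q = Queue()
--     q.put((root_index, 'root', 0))
--     q.put((-1, '|', None))
--     current_depth = 0
--     # Single pipes separate children of a particular node.
--     # Double pipes separate tree levels.
--     result = []
--     while not q.empty():
--         current_node, relation, new_depth = q.get()
--         if relation == '|':
--             result.append(relation)
--             continue
--         if new_depth != current_depth:
--             result.append('||')
--             current_depth = new_depth
--         result.append(relation)
--         # Check if we reached a leaf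
--         if current_node in conll_tree:
--             for key, relation in conll_tree[current_node]:
--                 q.put((key, relation, current_depth+1))
--             q.put((-1, '|', None))
--     return result
-- ===== SOURCE B (Python) =====
-- from collections import deque
--
--
-- def linearise_tree(conll_tree, root_index):
--     # BFS with a deque of real (node, depth) pairs; a node's children tokens
--     # are emitted when the node is expanded, and level boundaries come from
--     # the explicit depths.
--     result = ['root', '|']
--     current_depth = 0
--     pending = deque([(root_index, 0)])
--     while pending:
--         node, depth = pending.popleft()
--         if node in conll_tree:
--             for key, relation in conll_tree[node]:
--                 if depth + 1 != current_depth: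
--                     result.append('||')
--                     current_depth = depth + 1
--                 result.append(relation)
--                 pending.append((key, depth + 1))
--             result.append('|')
--     return result
-- ===== Notes on version B (the rewrite author's own statement) =====
-- stated objective: simpler
-- what changed: Replaces the sentinel-based BFS (queue items interleaved with '|' marker tuples and a None-depth hack) by a deque of real (node, depth) pairs that emits a node's children tokens at expansion time, deriving level boundaries from explicit depths; Pre_ excludes trees where some relation label is literally the separator string '|' (A's in-queue sentinel collides with the data there, so the token output is ambiguous and either reading is defensible) and inputs with a reachable dependency cycle (A loops forever).
-- outside the precondition, e.g. on linearise_tree({0: [(1, '|')]}, 0): A returns ['root', '|', '|', '|'], B returns ['root', '|', '||', '|', '|']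
import Mathlib
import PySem

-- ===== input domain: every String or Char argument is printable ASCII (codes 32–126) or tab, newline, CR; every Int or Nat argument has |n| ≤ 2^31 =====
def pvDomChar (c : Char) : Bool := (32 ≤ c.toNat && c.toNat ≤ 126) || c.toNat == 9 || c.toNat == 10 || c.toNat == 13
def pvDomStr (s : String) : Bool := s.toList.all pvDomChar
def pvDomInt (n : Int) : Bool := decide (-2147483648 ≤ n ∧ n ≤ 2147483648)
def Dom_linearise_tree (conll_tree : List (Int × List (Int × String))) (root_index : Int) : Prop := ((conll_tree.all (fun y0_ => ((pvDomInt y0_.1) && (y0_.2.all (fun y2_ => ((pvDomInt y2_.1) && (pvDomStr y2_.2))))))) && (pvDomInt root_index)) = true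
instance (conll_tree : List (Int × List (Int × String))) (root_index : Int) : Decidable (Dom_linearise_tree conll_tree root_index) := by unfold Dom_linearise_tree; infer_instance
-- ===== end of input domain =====

-- B replaces the sentinel-marker BFS queue by a deque of real (node, depth) pairs that emits a
-- node's children tokens at expansion time (simpler decomposition; same output, same cost class).

-- Shared helper: Python's `node in conll_tree` / `conll_tree[node]` (first-match association lookup).
def pvChildren (t : List (Int × List (Int × String))) (n : Int) : Option (List (Int × String)) :=
  match t with
  | [] => none
  | (k, v) :: rest => if k = n then some v else pvChildren rest n

-- Fuel bound shared by both ports (an upper bound on the number of loop iterations; under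
-- Pre_linearise_tree the queues empty strictly before it runs out, so it only makes the loops total).
def pvPathBound (t : List (Int × List (Int × String))) : Nat → Int → Nat
  | 0, _ => 1
  | b + 1, n =>
    match pvChildren t n with
    | none => 1
    | some ch => 2 + (ch.map (fun kr => pvPathBound t b kr.1)).sum

def pvFuel (t : List (Int × List (Int × String))) (root : Int) : Nat :=
  pvPathBound t (t.length + 1) root + 1

-- ===== PORT A =====
-- the queue holds (node, relation, depth) items; depth is `none` for the '|' sentinel rows (Python's None)
def lineariseA_go (t : List (Int × List (Int × String))) :
    Nat → List (Int × String × Option Int) → Int → List String → List String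
  | 0, _, _, result => result                -- fuel exhausted (never happens under Pre_linearise_tree)
  | _ + 1, [], _, result => result           -- while not q.empty()
  | f + 1, (node, rel, nd) :: rest, cd, result =>
    if rel = "|" then lineariseA_go t f rest cd (result ++ ["|"])
    else
      -- new_depth is never None here (None only occurs on sentinel rows, handled above), so getD is exact
      let cd' := if nd ≠ some cd then nd.getD cd else cd
      let result' := (if nd ≠ some cd then result ++ ["||"] else result) ++ [rel]
      match pvChildren t node with
      | some ch =>
          lineariseA_go t f (rest ++ ch.map (fun kr => (kr.1, kr.2, some (cd' + 1))) ++ [(-1, "|", none)]) cd' result'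
      | none => lineariseA_go t f rest cd' result'

def linearise_tree (conll_tree : List (Int × List (Int × String))) (root_index : Int) : List String :=
  lineariseA_go conll_tree (pvFuel conll_tree root_index)
    [(root_index, "root", some 0), (-1, "|", none)] 0 []

-- ===== PORT B =====
-- the child loop's running state is (result, current_depth, newly queued pairs)
def lineariseB_go (t : List (Int × List (Int × String))) :
    Nat → List (Int × Int) → Int → List String → List String
  | 0, _, _, result => result                -- fuel exhausted (never happens under Pre_linearise_tree)
  | _ + 1, [], _, result => result           -- while pending
  | g + 1, (node, depth) :: rest, cd, result =>
    match pvChildren t node with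
    | none => lineariseB_go t g rest cd result
    | some ch =>
      let s := ch.foldl
        (fun (s : List String × Int × List (Int × Int)) (kr : Int × String) =>
          ((if depth + 1 ≠ s.2.1 then s.1 ++ ["||"] else s.1) ++ [kr.2],
           (if depth + 1 ≠ s.2.1 then depth + 1 else s.2.1),
           s.2.2 ++ [(kr.1, depth + 1)]))
        (result, cd, ([] : List (Int × Int)))
      lineariseB_go t g (rest ++ s.2.2) s.2.1 (s.1 ++ ["|"])

def linearise_tree_alt (conll_tree : List (Int × List (Int × String))) (root_index : Int) : List String :=
  lineariseB_go conll_tree (pvFuel conll_tree root_index) [(root_index, 0)] 0 ["root", "|"]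

-- ===== PRECONDITION & SPEC =====
-- child keys of a node (empty for a leaf): first entry of the association list with key n
def pvCK (t : List (Int × List (Int × String))) (n : Int) : List Int :=
  ((t.find? (fun p => p.1 = n)).elim [] (fun p => p.2.map Prod.fst))

-- m rounds of (deduplicated) closure of a node set under child edges
def pvGrow (t : List (Int × List (Int × String))) : Nat → List Int → List Int
  | 0, S => S
  | m + 1, S => pvGrow t m ((S ++ S.flatMap (pvCK t)).dedup)

-- Pre_ excludes (a) inputs with a dependency cycle reachable from root_index, on which the Python A
-- loops forever, and (b) trees in which some relation label is literally the separator string '|':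
-- there A's in-queue sentinel collides with the data, the token output is ambiguous either way, and
-- A and B make different defensible readings of it.
def Pre_linearise_tree (conll_tree : List (Int × List (Int × String))) (root_index : Int) : Prop :=
  (∀ p ∈ conll_tree, ∀ c ∈ p.2, c.2 ≠ "|") ∧
  ∀ k ∈ pvGrow conll_tree (conll_tree.length + 1) [root_index],
    k ∉ pvGrow conll_tree (conll_tree.length + 1) (pvCK conll_tree k)

instance (conll_tree : List (Int × List (Int × String))) (root_index : Int) :
    Decidable (Pre_linearise_tree conll_tree root_index) := by
  unfold Pre_linearise_tree; infer_instance

def pvWitness_linearise_tree : (List (Int × List (Int × String))) × Int :=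
  ([(0, [(1, "nsubj"), (2, "obj")]), (1, [(3, "det")])], 0)

def Spec_linearise_tree (conll_tree : List (Int × List (Int × String))) (root_index : Int) (out : List String) : Prop := out = linearise_tree_alt conll_tree root_index
instance (conll_tree : List (Int × List (Int × String))) (root_index : Int) (out : List String) : Decidable (Spec_linearise_tree conll_tree root_index out) := by unfold Spec_linearise_tree; infer_instance

-- ===== CLAIM (what is proved, stated in full; the proofs are below) =====
def Claim_equal_linearise_tree : Prop := ∀ (conll_tree : List (Int × List (Int × String))) (root_index : Int), Dom_linearise_tree conll_tree root_index → Pre_linearise_tree conll_tree root_index → Spec_linearise_tree conll_tree root_index (linearise_tree conll_tree root_index)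

-- ===== LEMMAS AND PROOFS =====

-- the tokens A will emit for the items already sitting in its queue (no expansions), plus the
-- resulting current_depth; this is the "pending output" B has already produced.
def pvToks : List (Int × String × Option Int) → Int → List String × Int
  | [], cd => ([], cd)
  | (_, r, nd) :: rest, cd =>
    if r = "|" then
      let p := pvToks rest cd
      ("|" :: p.1, p.2)
    else
      let cd' := if nd ≠ some cd then nd.getD cd else cd
      let p := pvToks rest cd'
      ((if nd ≠ some cd then ["||", r] else [r]) ++ p.1, p.2)

-- B's queue corresponding to an A queue: drop sentinel rows, keep (node, depth)
def pvFilt (q : List (Int × String × Option Int)) : List (Int × Int) :=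
  q.filterMap (fun x => if x.2.1 = "|" then none else some (x.1, x.2.2.getD 0))

-- annotated queues: each item carries a pvHt budget
def pvCostA (t : List (Int × List (Int × String))) (aq : List ((Int × String × Option Int) × Nat)) : Nat :=
  (aq.map (fun x => if x.1.2.1 = "|" then 1 else pvPathBound t x.2 x.1.1)).sum

def pvCostB (t : List (Int × List (Int × String))) (aq : List ((Int × String × Option Int) × Nat)) : Nat :=
  (aq.map (fun x => if x.1.2.1 = "|" then 0 else pvPathBound t x.2 x.1.1)).sum

-- height certificate: pvHt t b n bounds the height of the subtree below n
inductive pvHt (t : List (Int × List (Int × String))) : Nat → Int → Prop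
  | leaf (b : Nat) (n : Int) : pvChildren t n = none → pvHt t b n
  | node (b : Nat) (n : Int) (ch : List (Int × String)) :
      pvChildren t n = some ch → (∀ k r, (k, r) ∈ ch → pvHt t b k) → pvHt t (b + 1) n

def pvChainUp (t : List (Int × List (Int × String))) : List Int → Int → Prop
  | [], _ => True
  | a :: as, n => n ∈ pvCK t a ∧ pvChainUp t as a

theorem pvCK_eq (t : List (Int × List (Int × String))) (n : Int) :
    pvCK t n = ((pvChildren t n).getD []).map Prod.fst := by
  induction t with
  | nil => simp [pvCK, pvChildren]
  | cons p rest ih =>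
    by_cases h : p.1 = n
    · simp [pvCK, pvChildren, List.find?, h]
    · simp only [pvCK, pvChildren, List.find?] at ih ⊢
      simp [h, ih]

theorem pvChildren_sub (t : List (Int × List (Int × String))) (n : Int)
    (ch : List (Int × String)) (h : pvChildren t n = some ch) : ∃ p ∈ t, p.2 = ch := by
  induction t with
  | nil => simp [pvChildren] at h
  | cons p rest ih =>
    obtain ⟨k, v⟩ := p
    by_cases hk : k = n
    · simp only [pvChildren, if_pos hk] at h
      exact ⟨(k, v), by simp, by injection h⟩
    · simp only [pvChildren, if_neg hk] at h
      obtain ⟨q, hq, hq2⟩ := ih h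
      exact ⟨q, by simp [hq], hq2⟩

theorem pvPathBound_pos (t : List (Int × List (Int × String))) (b : Nat) (n : Int) :
    1 ≤ pvPathBound t b n := by
  cases b with
  | zero => simp [pvPathBound]
  | succ b =>
    cases h : pvChildren t n
    · simp [pvPathBound, h]
    · simp only [pvPathBound, h]; omega

theorem pvHt_node_inv {t : List (Int × List (Int × String))} {b : Nat} {n : Int}
    {ch : List (Int × String)} (h : pvHt t b n) (hc : pvChildren t n = some ch) :
    ∃ b', b = b' + 1 ∧ ∀ k r, (k, r) ∈ ch → pvHt t b' k := by
  cases h with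
  | leaf b n h => rw [h] at hc; cases hc
  | node b n ch' hc' hk =>
    rw [hc'] at hc; injection hc with hch; subst hch; exact ⟨b, rfl, hk⟩

theorem pvRunB_nil (t : List (Int × List (Int × String))) (g : Nat) (cd : Int) (res : List String) :
    lineariseB_go t g [] cd res = res := by
  cases g <;> simp [lineariseB_go]

-- B's child loop computes exactly the tokens of A's freshly-enqueued child rows
theorem pvFold_children (d : Int) :
    ∀ (ch : List (Int × String)), (∀ kr ∈ ch, kr.2 ≠ "|") →
    ∀ (res : List String) (cd : Int) (ns : List (Int × Int)),
    ch.foldl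
        (fun (s : List String × Int × List (Int × Int)) (kr : Int × String) =>
          ((if d + 1 ≠ s.2.1 then s.1 ++ ["||"] else s.1) ++ [kr.2],
           (if d + 1 ≠ s.2.1 then d + 1 else s.2.1),
           s.2.2 ++ [(kr.1, d + 1)]))
        (res, cd, ns)
      = (res ++ (pvToks (ch.map (fun kr => (kr.1, kr.2, some (d + 1)))) cd).1,
         (pvToks (ch.map (fun kr => (kr.1, kr.2, some (d + 1)))) cd).2,
         ns ++ ch.map (fun kr => (kr.1, d + 1))) := by
  intro ch
  induction ch with
  | nil => intro _ res cd ns; simp [pvToks]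
  | cons kr rest ih =>
    intro hne res cd ns
    obtain ⟨k, r⟩ := kr
    have hr : r ≠ "|" := hne (k, r) (by simp)
    have hrest : ∀ kr ∈ rest, kr.2 ≠ "|" := fun kr hkr => hne kr (by simp [hkr])
    by_cases hd : d + 1 = cd
    · have hnn : ¬(d + 1 ≠ cd) := by omega
      simp only [List.foldl_cons]
      rw [if_neg hnn, if_neg hnn, ih hrest]
      simp [pvToks, hr, hd]
    · simp only [List.foldl_cons]
      rw [if_pos hd, if_pos hd, ih hrest]
      simp [pvToks, hr, hd]

theorem pvFiltCh (ch : List (Int × String)) (d : Int) (hne : ∀ kr ∈ ch, kr.2 ≠ "|") :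
    pvFilt (ch.map (fun kr => (kr.1, kr.2, some (d + 1)))) = ch.map (fun kr => (kr.1, d + 1)) := by
  induction ch with
  | nil => simp [pvFilt]
  | cons kr rest ih =>
    have hr : kr.2 ≠ "|" := hne kr (by simp)
    have hrest : ∀ x ∈ rest, x.2 ≠ "|" := fun x hx => hne x (List.mem_cons_of_mem _ hx)
    simp only [pvFilt, List.map_cons, List.filterMap_cons] at ih ⊢
    simp [hr, ih hrest]

theorem pvToks_append (xs ys : List (Int × String × Option Int)) (cd : Int) :
    pvToks (xs ++ ys) cd =
      ((pvToks xs cd).1 ++ (pvToks ys (pvToks xs cd).2).1, (pvToks ys (pvToks xs cd).2).2) := by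
  induction xs generalizing cd with
  | nil => simp [pvToks]
  | cons x xs ih =>
    obtain ⟨n, r, nd⟩ := x
    by_cases hr : r = "|" <;> simp [pvToks, hr, ih]

-- the bisimulation: A's fueled loop equals B's fueled loop run on the filtered queue,
-- B being ahead by the pending tokens of A's queue
theorem pvMain (t : List (Int × List (Int × String)))
    (hnp : ∀ p ∈ t, ∀ c ∈ p.2, c.2 ≠ "|") :
    ∀ (f g : Nat) (aq : List ((Int × String × Option Int) × Nat)) (cd : Int) (res : List String),
    (∀ x ∈ aq, x.1.2.1 ≠ "|" → pvHt t x.2 x.1.1 ∧ ∃ d, x.1.2.2 = some d) →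
    pvCostA t aq ≤ f → pvCostB t aq ≤ g →
    lineariseA_go t f (aq.map Prod.fst) cd res =
      lineariseB_go t g (pvFilt (aq.map Prod.fst)) (pvToks (aq.map Prod.fst) cd).2
        (res ++ (pvToks (aq.map Prod.fst) cd).1) := by
  intro f
  induction f with
  | zero =>
    intro g aq cd res _hall ha _hb
    cases aq with
    | nil => simp [pvToks, pvFilt, lineariseA_go, pvRunB_nil]
    | cons x aqs =>
      exfalso
      have h1 : 1 ≤ pvCostA t (x :: aqs) := by
        simp only [pvCostA, List.map_cons, List.sum_cons]
        have := pvPathBound_pos t x.2 x.1.1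
        split <;> omega
      omega
  | succ f ih =>
    intro g aq cd res hall ha hb
    cases aq with
    | nil => simp [pvToks, pvFilt, lineariseA_go, pvRunB_nil]
    | cons x aqs =>
      obtain ⟨⟨n, r, nd⟩, bb⟩ := x
      by_cases hr : r = "|"
      · -- sentinel row: A emits '|' and moves on; B's pending output already has it
        subst hr
        have ha' : pvCostA t aqs ≤ f := by
          simp [pvCostA] at ha ⊢; omega
        have hb' : pvCostB t aqs ≤ g := by
          simp [pvCostB] at hb ⊢; omega
        have hstep : lineariseA_go t (f + 1) ((n, "|", nd) :: aqs.map Prod.fst) cd res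
            = lineariseA_go t f (aqs.map Prod.fst) cd (res ++ ["|"]) := by
          simp [lineariseA_go]
        simp only [List.map_cons, hstep]
        rw [ih g aqs cd (res ++ ["|"]) (fun y hy => hall y (List.mem_cons_of_mem _ hy)) ha' hb']
        simp [pvFilt, pvToks]
      · obtain ⟨hht, d, hnd⟩ := hall ⟨(n, r, nd), bb⟩ (List.mem_cons_self) hr
        subst hnd
        have hcd' : (if some d ≠ some cd then (some d).getD cd else cd) = d := by
          by_cases h : d = cd <;> simp [h]
        have htoks : pvToks ((n, r, some d) :: aqs.map Prod.fst) cd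
            = ((if some d ≠ some cd then ["||", r] else [r]) ++ (pvToks (aqs.map Prod.fst) d).1,
               (pvToks (aqs.map Prod.fst) d).2) := by
          by_cases h : d = cd <;> simp [pvToks, hr, h]
        have hfilt : pvFilt ((n, r, some d) :: aqs.map Prod.fst)
            = (n, d) :: pvFilt (aqs.map Prod.fst) := by
          simp [pvFilt, hr]
        cases hc : pvChildren t n with
        | none =>
          have hP1 : 1 ≤ pvPathBound t bb n := pvPathBound_pos t bb n
          have ha' : pvCostA t aqs ≤ f := by
            simp [pvCostA, hr] at ha ⊢; omega
          cases g with
          | zero => exfalso; simp [pvCostB, hr] at hb; omega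
          | succ g' =>
            have hb' : pvCostB t aqs ≤ g' := by
              simp [pvCostB, hr] at hb ⊢; omega
            have hAstep : lineariseA_go t (f + 1) ((n, r, some d) :: aqs.map Prod.fst) cd res
                = lineariseA_go t f (aqs.map Prod.fst) d
                    ((if some d ≠ some cd then res ++ ["||"] else res) ++ [r]) := by
              simp only [lineariseA_go, if_neg hr, hc, hcd']
            have hBstep : lineariseB_go t (g' + 1) ((n, d) :: pvFilt (aqs.map Prod.fst))
                  (pvToks (aqs.map Prod.fst) d).2
                  (res ++ ((if some d ≠ some cd then ["||", r] else [r]) ++ (pvToks (aqs.map Prod.fst) d).1))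
                = lineariseB_go t g' (pvFilt (aqs.map Prod.fst)) (pvToks (aqs.map Prod.fst) d).2
                    (res ++ ((if some d ≠ some cd then ["||", r] else [r]) ++ (pvToks (aqs.map Prod.fst) d).1)) := by
              simp [lineariseB_go, hc]
            simp only [List.map_cons, hAstep, htoks, hfilt, hBstep]
            rw [ih g' aqs d _ (fun y hy => hall y (List.mem_cons_of_mem _ hy)) ha' hb']
            by_cases h : d = cd <;> simp [h]
        | some ch =>
          obtain ⟨b0, rfl, hchld⟩ := pvHt_node_inv hht hc
          have hne : ∀ kr ∈ ch, kr.2 ≠ "|" := by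
            obtain ⟨p, hp, hp2⟩ := pvChildren_sub t n ch hc
            intro kr hkr
            exact hnp p hp kr (hp2 ▸ hkr)
          have hPn : pvPathBound t (b0 + 1) n
              = 2 + (ch.map (fun kr => pvPathBound t b0 kr.1)).sum := by
            simp [pvPathBound, hc]
          have hsumA : ((ch.map (fun kr => ((kr.1, kr.2, some (d + 1)), b0))).map
                (fun x => if x.1.2.1 = "|" then 1 else pvPathBound t x.2 x.1.1)).sum
              ≤ (ch.map (fun kr => pvPathBound t b0 kr.1)).sum := by
            rw [List.map_map]
            apply List.sum_le_sum
            intro kr _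
            by_cases h : kr.2 = "|" <;> simp [h, pvPathBound_pos]
          have hsumB : ((ch.map (fun kr => ((kr.1, kr.2, some (d + 1)), b0))).map
                (fun x => if x.1.2.1 = "|" then 0 else pvPathBound t x.2 x.1.1)).sum
              ≤ (ch.map (fun kr => pvPathBound t b0 kr.1)).sum := by
            rw [List.map_map]
            apply List.sum_le_sum
            intro kr _
            by_cases h : kr.2 = "|" <;> simp [h]
          have ha' : pvCostA t (aqs ++ ch.map (fun kr => ((kr.1, kr.2, some (d + 1)), b0))
                ++ [(((-1 : Int), "|", (none : Option Int)), 0)]) ≤ f := by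
            simp only [pvCostA, List.map_cons, List.sum_cons, if_neg hr, hPn] at ha
            simp only [pvCostA, List.map_append, List.sum_append, List.map_cons, List.sum_cons,
              List.map_nil, List.sum_nil, if_true]
            omega
          cases g with
          | zero =>
            exfalso
            have : 1 ≤ pvPathBound t (b0 + 1) n := pvPathBound_pos t (b0 + 1) n
            simp [pvCostB, hr] at hb
            omega
          | succ g' =>
            have hb' : pvCostB t (aqs ++ ch.map (fun kr => ((kr.1, kr.2, some (d + 1)), b0))
                  ++ [(((-1 : Int), "|", (none : Option Int)), 0)]) ≤ g' := by
              simp only [pvCostB, List.map_cons, List.sum_cons, if_neg hr, hPn] at hb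
              simp only [pvCostB, List.map_append, List.sum_append, List.map_cons, List.sum_cons,
                List.map_nil, List.sum_nil, if_true]
              omega
            have hall' : ∀ y ∈ aqs ++ ch.map (fun kr => ((kr.1, kr.2, some (d + 1)), b0))
                  ++ [(((-1 : Int), "|", (none : Option Int)), 0)],
                y.1.2.1 ≠ "|" → pvHt t y.2 y.1.1 ∧ ∃ d', y.1.2.2 = some d' := by
              intro y hy hyr
              rcases List.mem_append.mp hy with hy | hy
              · rcases List.mem_append.mp hy with hy | hy
                · exact hall y (List.mem_cons_of_mem _ hy) hyr
                · rcases List.mem_map.mp hy with ⟨kr, hkr, rfl⟩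
                  exact ⟨hchld kr.1 kr.2 hkr, d + 1, rfl⟩
              · simp at hy; subst hy; simp at hyr
            have hproj : (aqs ++ ch.map (fun kr : Int × String => ((kr.1, kr.2, some (d + 1)), b0))
                  ++ [(((-1 : Int), "|", (none : Option Int)), 0)]).map Prod.fst
                = aqs.map Prod.fst ++ ch.map (fun kr : Int × String => (kr.1, kr.2, some (d + 1)))
                  ++ [((-1 : Int), "|", (none : Option Int))] := by
              simp [List.map_map, Function.comp_def]
            have hAstep : lineariseA_go t (f + 1) ((n, r, some d) :: aqs.map Prod.fst) cd res
                = lineariseA_go t f (aqs.map Prod.fst ++ ch.map (fun kr : Int × String => (kr.1, kr.2, some (d + 1)))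
                    ++ [((-1 : Int), "|", (none : Option Int))]) d
                    ((if some d ≠ some cd then res ++ ["||"] else res) ++ [r]) := by
              simp only [lineariseA_go, if_neg hr, hc, hcd']
            simp only [List.map_cons, hAstep, htoks, hfilt, ← hproj]
            rw [ih g' _ d _ hall' ha' hb']
            rw [hproj]
            -- unfold one step of B and rewrite its child loop with pvFold_children
            show _ = lineariseB_go t (g' + 1) ((n, d) :: pvFilt (List.map Prod.fst aqs)) _ _
            simp only [lineariseB_go, hc]
            rw [pvFold_children d ch hne]
            simp only [pvToks_append]
            have hfc : pvFilt (aqs.map Prod.fst ++ ch.map (fun kr : Int × String => (kr.1, kr.2, some (d + 1)))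
                  ++ [((-1 : Int), "|", (none : Option Int))])
                = pvFilt (aqs.map Prod.fst) ++ ch.map (fun kr => (kr.1, d + 1)) := by
              simp only [pvFilt, List.filterMap_append] at *
              rw [show (ch.map (fun kr : Int × String => (kr.1, kr.2, some (d + 1)))).filterMap
                    (fun x => if x.2.1 = "|" then none else some (x.1, x.2.2.getD 0))
                  = pvFilt (ch.map (fun kr : Int × String => (kr.1, kr.2, some (d + 1)))) from rfl,
                pvFiltCh ch d hne]
              simp
            rw [hfc]
            by_cases h : d = cd <;>
              simp [pvToks, h, List.append_assoc]

-- grow lemmas -------------------------------------------------------------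
theorem pvGrow_mono_set (t : List (Int × List (Int × String))) :
    ∀ (m : Nat) (S T : List Int), S ⊆ T → pvGrow t m S ⊆ pvGrow t m T := by
  intro m
  induction m with
  | zero => intro S T h; simpa [pvGrow] using h
  | succ m ih =>
    intro S T h
    simp only [pvGrow]
    apply ih
    intro x hx
    simp only [List.mem_dedup, List.mem_append, List.mem_flatMap] at hx ⊢
    rcases hx with hx | ⟨a, ha, hxa⟩
    · exact Or.inl (h hx)
    · exact Or.inr ⟨a, h ha, hxa⟩

theorem pvGrow_mono_m (t : List (Int × List (Int × String))) {m m' : Nat} (h : m ≤ m') :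
    ∀ S : List Int, pvGrow t m S ⊆ pvGrow t m' S := by
  induction h with
  | refl => intro S; exact fun _ h => h
  | step h ih =>
    intro S x hx
    have hx' := ih S hx
    show x ∈ pvGrow t (_ + 1) S
    simp only [pvGrow]
    exact pvGrow_mono_set t _ _ _ (by intro y hy; simp only [List.mem_dedup, List.mem_append]; exact Or.inl hy) hx'

theorem pvGrow_step (t : List (Int × List (Int × String))) :
    ∀ (m : Nat) (S : List Int) (a b : Int),
      a ∈ pvGrow t m S → b ∈ pvCK t a → b ∈ pvGrow t (m + 1) S := by
  intro m
  induction m with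
  | zero =>
    intro S a b ha hb
    have hmem : b ∈ (S ++ S.flatMap (pvCK t)).dedup := by
      simp only [List.mem_dedup, List.mem_append, List.mem_flatMap]
      exact Or.inr ⟨a, by simpa [pvGrow] using ha, hb⟩
    simpa [pvGrow] using hmem
  | succ m ih =>
    intro S a b ha hb
    exact ih _ a b ha hb

-- chain lemmas ------------------------------------------------------------
theorem pvChainUp_drop (t : List (Int × List (Int × String))) :
    ∀ (s : List Int) (k : Int) (u : List Int) (n : Int),
      pvChainUp t (s ++ k :: u) n → pvChainUp t (s ++ [k]) n := by
  intro s
  induction s with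
  | nil => intro k u n h; exact ⟨h.1, trivial⟩
  | cons a s ih => intro k u n h; exact ⟨h.1, ih k u a h.2⟩

theorem pvChain_last (t : List (Int × List (Int × String))) :
    ∀ (s : List Int) (a n : Int),
      pvChainUp t (s ++ [a]) n → n ∈ pvGrow t s.length (pvCK t a) := by
  intro s
  induction s with
  | nil => intro a n h; exact h.1
  | cons b s ih =>
    intro a n h
    have hb := ih a b h.2
    simpa using pvGrow_step t s.length _ b n hb h.1

theorem pvChildren_ne_none_mem {t : List (Int × List (Int × String))} {n : Int}
    (h : pvChildren t n ≠ none) : n ∈ t.map Prod.fst := by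
  induction t with
  | nil => simp [pvChildren] at h
  | cons p rest ih =>
    obtain ⟨k, v⟩ := p
    by_cases hk : k = n
    · simp [hk]
    · simp only [pvChildren, if_neg hk] at h
      simp [ih h]

theorem pvAnc_length_le (t : List (Int × List (Int × String))) (anc : List Int)
    (hnd : anc.Nodup) (hk : ∀ a ∈ anc, pvChildren t a ≠ none) : anc.length ≤ t.length := by
  have hsub : anc ⊆ t.map Prod.fst := fun a ha => pvChildren_ne_none_mem (hk a ha)
  calc anc.length = anc.toFinset.card := (List.toFinset_card_of_nodup hnd).symm
    _ ≤ (t.map Prod.fst).toFinset.card := by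
        apply Finset.card_le_card
        intro x hx
        rw [List.mem_toFinset] at hx ⊢
        exact hsub hx
    _ ≤ (t.map Prod.fst).length := List.toFinset_card_le _
    _ = t.length := by simp

theorem pvHtAll (t : List (Int × List (Int × String))) (root : Int)
    (hpre : ∀ k ∈ pvGrow t (t.length + 1) [root], k ∉ pvGrow t (t.length + 1) (pvCK t k)) :
    ∀ (b : Nat) (anc : List Int) (n : Int),
      b = t.length + 1 - anc.length →
      anc.Nodup → n ∉ anc →
      (∀ a ∈ anc, pvChildren t a ≠ none) →
      pvChainUp t anc n →
      n ∈ pvGrow t anc.length [root] →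
      (∀ a ∈ anc, a ∈ pvGrow t (t.length + 1) [root]) →
      pvHt t b n := by
  intro b
  induction b with
  | zero =>
    intro anc n hb hnd _hnin hk _hch _hgn _hga
    exfalso
    have := pvAnc_length_le t anc hnd hk
    omega
  | succ b ih =>
    intro anc n hb hnd hnin hk hch hgn hga
    cases hc : pvChildren t n with
    | none => exact pvHt.leaf _ _ hc
    | some ch =>
      have hlen : anc.length ≤ t.length := pvAnc_length_le t anc hnd hk
      have hnreach : n ∈ pvGrow t (t.length + 1) [root] :=
        pvGrow_mono_m t (by omega) [root] hgn
      refine pvHt.node b n ch hc ?_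
      intro k r hkr
      have hkck : k ∈ pvCK t n := by
        rw [pvCK_eq]
        simp only [hc, Option.getD_some, List.mem_map]
        exact ⟨(k, r), hkr, rfl⟩
      have hknotin : k ∉ n :: anc := by
        intro hkin
        rcases List.mem_cons.mp hkin with hkn | hka
        · subst hkn
          exact hpre k hnreach (pvGrow_mono_m t (Nat.zero_le _) _ (by simpa [pvGrow] using hkck))
        · rcases List.append_of_mem hka with ⟨s, u, rfl⟩
          have hchain2 : pvChainUp t (s ++ [k]) n := pvChainUp_drop t s k u n hch
          have hmem : n ∈ pvGrow t s.length (pvCK t k) := pvChain_last t s k n hchain2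
          have hkgrow : k ∈ pvGrow t (s.length + 1) (pvCK t k) :=
            pvGrow_step t s.length _ n k hmem hkck
          have hs1 : s.length + 1 ≤ t.length + 1 := by
            have : s.length < (s ++ k :: u).length := by simp
            omega
          exact hpre k (hga k hka) (pvGrow_mono_m t hs1 _ hkgrow)
      refine ih (n :: anc) k (by simp; omega) (List.nodup_cons.mpr ⟨hnin, hnd⟩) hknotin
        ?_ ⟨hkck, hch⟩ ?_ ?_
      · intro a ha
        rcases List.mem_cons.mp ha with rfl | ha
        · simp [hc]
        · exact hk a ha
      · simpa using pvGrow_step t anc.length [root] n k hgn hkck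
      · intro a ha
        rcases List.mem_cons.mp ha with rfl | ha
        · exact hnreach
        · exact hga a ha

theorem pvHt_root (t : List (Int × List (Int × String))) (root : Int)
    (hpre : ∀ k ∈ pvGrow t (t.length + 1) [root], k ∉ pvGrow t (t.length + 1) (pvCK t k)) :
    pvHt t (t.length + 1) root := by
  have := pvHtAll t root hpre (t.length + 1) [] root (by simp) (by simp) (by simp)
    (by simp) trivial (by simp [pvGrow]) (by simp)
  exact this

-- ===== VERDICT (by name: the statement is the Claim_ definition above) =====
theorem linearise_tree_spec : Claim_equal_linearise_tree := by
  intro t root _hdom hpre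
  unfold Spec_linearise_tree linearise_tree linearise_tree_alt
  have h := pvMain t hpre.1 (pvFuel t root) (pvFuel t root)
    [((root, "root", some 0), t.length + 1), ((-1, "|", none), 0)] 0 []
    (by
      intro x hx hr
      simp only [List.mem_cons, List.not_mem_nil, or_false] at hx
      rcases hx with hx | hx
      · subst hx; exact ⟨pvHt_root t root hpre.2, 0, rfl⟩
      · subst hx; simp at hr)
    (by simp [pvCostA, pvFuel])
    (by simp [pvCostB, pvFuel])
  simp only [List.map_cons, List.map_nil] at h
  rw [h]
  simp [pvFilt, pvToks, show ("root" : String) ≠ "|" by decide]
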